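-- pv_equiv track=rewrite | github.com/pypi-data/pypi-mirror-401 | packages/modu/modu-0.1.1.tar.gz/modu-0.1.1/src/modu.py | strict_divisors
-- ===== SOURCE A (Python) =====
-- def strict_divisors(n):
--     res = []
--     d = 1
--     for p in range(2,n):
--         while n % p == 0:
--             d *= p
--             n //= p
--         if d > 1:
--             res.append(d)
--             d = 1
--     return res
-- ===== SOURCE B (Python) =====
-- def strict_divisors(n):
--     res = []
--     m = n
--     p = 2
--     while p * p <= m:
--         if m % p == 0:
--             d = p
--             m //= p
--             while m % p == 0:
--                 d *= p
--                 m //= p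
--             res.append(d)
--         p += 1
--     if 1 < m < n:
--         res.append(m)
--     return res
-- ===== Notes on version B (the rewrite author's own statement) =====
-- stated objective: faster
-- what changed: B trial-divides only up to sqrt of the shrinking remainder and appends the leftover prime cofactor once at the end, instead of A's scan of every candidate p in range(2, n).
import Mathlib
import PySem

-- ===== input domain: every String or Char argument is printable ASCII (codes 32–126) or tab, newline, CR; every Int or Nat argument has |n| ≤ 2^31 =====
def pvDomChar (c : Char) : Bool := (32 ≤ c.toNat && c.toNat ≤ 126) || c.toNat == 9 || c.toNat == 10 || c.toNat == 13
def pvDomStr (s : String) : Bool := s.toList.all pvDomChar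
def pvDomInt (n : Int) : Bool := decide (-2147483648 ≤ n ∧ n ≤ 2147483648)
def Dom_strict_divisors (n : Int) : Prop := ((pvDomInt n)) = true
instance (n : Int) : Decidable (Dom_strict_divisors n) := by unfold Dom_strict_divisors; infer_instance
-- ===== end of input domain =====

-- B replaces A's scan of every p in range(2, n) by trial division only while p*p ≤ the
-- shrinking remainder, appending the leftover prime cofactor once at the end (objective: faster).

-- ===== PORT A =====
-- inner 'while n % p == 0: d *= p; n //= p' (state (n, d)); fuel-bounded, fuel = |n| suffices
-- on every reachable state (n ≥ 1), where the Python loop terminates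
def pvDivLoop (p : Int) : Nat → Int × Int → Int × Int
  | 0, md => md
  | f + 1, md =>
    if PySem.Int.mod md.1 p = 0 then
      pvDivLoop p f (PySem.Int.floordiv md.1 p, md.2 * p)
    else md

-- one iteration of A's for-body, state (n, d, res)
def pvStepA (st : Int × Int × List Int) (p : Int) : Int × Int × List Int :=
  let md := pvDivLoop p st.1.natAbs (st.1, st.2.1)
  if 1 < md.2 then (md.1, 1, st.2.2 ++ [md.2]) else (md.1, md.2, st.2.2)

def strict_divisors (n : Int) : List Int :=
  ((PySem.List.pyRange 2 n 1).foldl pvStepA (n, 1, [])).2.2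

-- ===== PORT B =====
-- B's outer 'while p * p <= m' loop; its inner while is the same textual loop as A's, so it
-- reuses pvDivLoop (after the first division 'd = p; m //= p'); fuel |n|+1 suffices (p ≤ √n)
def pvOuterB : Nat → Int → Int → List Int → Int × List Int
  | 0, _, m, res => (m, res)
  | f + 1, p, m, res =>
    if p * p ≤ m then
      if PySem.Int.mod m p = 0 then
        let md := pvDivLoop p m.natAbs (PySem.Int.floordiv m p, p)
        pvOuterB f (p + 1) md.1 (res ++ [md.2])
      else pvOuterB f (p + 1) m res
    else (m, res)

def strict_divisors_alt (n : Int) : List Int :=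
  let mr := pvOuterB (n.natAbs + 1) 2 n []
  if 1 < mr.1 ∧ mr.1 < n then mr.2 ++ [mr.1] else mr.2

-- ===== PRECONDITION & SPEC =====
def Spec_strict_divisors (n : Int) (out : List Int) : Prop := out = strict_divisors_alt n
instance (n : Int) (out : List Int) : Decidable (Spec_strict_divisors n out) := by unfold Spec_strict_divisors; infer_instance

-- ===== CLAIM (what is proved, stated in full; the proofs are below) =====
def Claim_equal_strict_divisors : Prop := ∀ (n : Int), Dom_strict_divisors n → Spec_strict_divisors n (strict_divisors n)

-- ===== LEMMAS AND PROOFS =====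

-- fuel-free reference form of the divide-out loop
def divW (p m d : Int) : Int × Int :=
  if h : 2 ≤ p ∧ 1 ≤ m ∧ p ∣ m then
    divW p (PySem.Int.floordiv m p) (d * p)
  else (m, d)
termination_by m.toNat
decreasing_by
  have hp : (0:Int) < p := by omega
  have h1 : PySem.Int.floordiv m p < m := by
    rw [PySem.Int.floordiv_lt_iff_lt_mul hp]; nlinarith [h.2.1, h.1]
  have h2 : (0:Int) ≤ PySem.Int.floordiv m p := by
    rw [PySem.Int.floordiv_eq_ediv_of_pos hp]
    exact Int.ediv_nonneg (by omega) (by omega)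
  omega

lemma divW_not_dvd (p m d : Int) (h : ¬ p ∣ m) : divW p m d = (m, d) := by
  rw [divW, dif_neg]; tauto

lemma divW_step (p m d : Int) (hp : 2 ≤ p) (hm : 1 ≤ m) (h : p ∣ m) :
    divW p m d = divW p (PySem.Int.floordiv m p) (d * p) := by
  rw [divW, dif_pos ⟨hp, hm, h⟩]

lemma one_le_floordiv (p m : Int) (hp : 2 ≤ p) (hm : 1 ≤ m) (h : p ∣ m) :
    1 ≤ PySem.Int.floordiv m p := by
  rw [PySem.Int.le_floordiv_iff_mul_le (by omega : (0:Int) < p)]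
  have := Int.le_of_dvd (by omega) h; omega

lemma floordiv_lt_self (p m : Int) (hp : 2 ≤ p) (hm : 1 ≤ m) :
    PySem.Int.floordiv m p < m := by
  rw [PySem.Int.floordiv_lt_iff_lt_mul (by omega : (0:Int) < p)]; nlinarith

lemma floordiv_dvd_self (p m : Int) (hp : 2 ≤ p) (h : p ∣ m) :
    PySem.Int.floordiv m p ∣ m := by
  rw [PySem.Int.floordiv_eq_ediv_of_pos (by omega : (0:Int) < p)]
  exact ⟨p, (Int.ediv_mul_cancel h).symm⟩

lemma divW_main (p : Int) (hp : 2 ≤ p) : ∀ (k : Nat) (m d : Int), m.natAbs ≤ k → 1 ≤ m →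
    1 ≤ (divW p m d).1 ∧ (divW p m d).1 ∣ m ∧ ¬ p ∣ (divW p m d).1 ∧
      (1 ≤ d → d ≤ (divW p m d).2) := by
  intro k
  induction k with
  | zero => intro m d hk hm; omega
  | succ k ih =>
    intro m d hk hm
    by_cases h : p ∣ m
    · rw [divW_step p m d hp hm h]
      have h1 := one_le_floordiv p m hp hm h
      have h2 := floordiv_lt_self p m hp hm
      obtain ⟨i1, i2, i3, i4⟩ := ih (PySem.Int.floordiv m p) (d * p) (by omega) h1
      refine ⟨i1, i2.trans (floordiv_dvd_self p m hp h), i3, fun hd => ?_⟩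
      have : d ≤ d * p := by nlinarith
      exact this.trans (i4 (by nlinarith))
    · rw [divW_not_dvd p m d h]
      exact ⟨hm, dvd_refl m, h, fun _ => le_refl d⟩

lemma divW_d_large (p m : Int) (hp : 2 ≤ p) (hm : 1 ≤ m) (h : p ∣ m) :
    p ≤ (divW p m 1).2 := by
  rw [divW_step p m 1 hp hm h, one_mul]
  have h1 := one_le_floordiv p m hp hm h
  have := (divW_main p hp (PySem.Int.floordiv m p).natAbs (PySem.Int.floordiv m p) p
    (le_refl _) h1).2.2.2
  exact this (by omega)

lemma divW_self (m : Int) (hm : 2 ≤ m) : divW m m 1 = (1, m) := by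
  have hd : m ∣ m := dvd_refl m
  rw [divW_step m m 1 hm (by omega) hd, one_mul]
  have hfd : PySem.Int.floordiv m m = 1 := by
    rw [PySem.Int.floordiv_eq_ediv_of_pos (by omega : (0:Int) < m)]
    exact Int.ediv_self (by omega)
  rw [hfd, divW_not_dvd]
  intro h
  have := Int.le_of_dvd (by omega) h; omega

lemma pvDivLoop_eq_divW (p : Int) (hp : 2 ≤ p) : ∀ (f : Nat) (m d : Int),
    1 ≤ m → m.natAbs ≤ f → pvDivLoop p f (m, d) = divW p m d := by
  intro f
  induction f with
  | zero => intro m d hm hf; omega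
  | succ f ih =>
    intro m d hm hf
    by_cases h : p ∣ m
    · have hmod : PySem.Int.mod m p = 0 := (PySem.Int.mod_eq_zero_iff_dvd m p).mpr h
      have h1 := one_le_floordiv p m hp hm h
      have h2 := floordiv_lt_self p m hp hm
      simp only [pvDivLoop, hmod, if_pos]
      rw [ih (PySem.Int.floordiv m p) (d * p) h1 (by omega)]
      exact (divW_step p m d hp hm h).symm
    · have hmod : PySem.Int.mod m p ≠ 0 := fun hc =>
        h ((PySem.Int.mod_eq_zero_iff_dvd m p).mp hc)
      simp only [pvDivLoop, hmod, if_false]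
      exact (divW_not_dvd p m d h).symm

-- after the trial bound is passed (m < p*p, no prime factor below p), A's remaining
-- iterations append exactly the leftover cofactor m iff 1 < m < n
lemma tailA (n : Int) : ∀ (k : Nat) (p m : Int) (res : List Int), (n - p).toNat ≤ k →
    2 ≤ p → 1 ≤ m → m ≤ n → m < p * p → (∀ q, 2 ≤ q → q < p → ¬ q ∣ m) →
    ((PySem.List.pyRange p n 1).foldl pvStepA (m, 1, res)).2.2 =
      if 1 < m ∧ m < n then res ++ [m] else res := by
  intro k
  induction k with
  | zero =>
    intro p m res hk hp hm hmn hsq hinv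
    have hnp : n ≤ p := by omega
    rw [PySem.List.pyRange_one_eq_nil hnp]
    simp only [List.foldl_nil]
    rw [if_neg]
    rintro ⟨h1, h2⟩
    exact hinv m (by omega) (by omega) (dvd_refl m)
  | succ k ih =>
    intro p m res hk hp hm hmn hsq hinv
    by_cases hnp : n ≤ p
    · rw [PySem.List.pyRange_one_eq_nil hnp]
      simp only [List.foldl_nil]
      rw [if_neg]
      rintro ⟨h1, h2⟩
      exact hinv m (by omega) (by omega) (dvd_refl m)
    · have hpn : p < n := by omega
      rw [PySem.List.pyRange_one_cons hpn, List.foldl_cons]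
      by_cases hpm : p = m
      · subst hpm
        have hstep : pvStepA (p, 1, res) p = (1, 1, res ++ [p]) := by
          simp only [pvStepA]
          rw [pvDivLoop_eq_divW p hp p.natAbs p 1 (by omega) (le_refl _),
            divW_self p hp]
          rw [if_pos (by omega)]
        rw [hstep, ih (p + 1) 1 (res ++ [p]) (by omega) (by omega) (by omega)
          (by omega) (by nlinarith) (fun q hq _ hd => by
            have := Int.le_of_dvd (by omega) hd; omega)]
        rw [if_neg (by omega), if_pos ⟨by omega, hpn⟩]
      · have hnd : ¬ p ∣ m := by
          intro hdvd
          have hple : p ≤ m := Int.le_of_dvd (by omega) hdvd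
          have hplt : p < m := by omega
          set c := PySem.Int.floordiv m p with hc
          have hc1 : 1 ≤ c := one_le_floordiv p m hp hm hdvd
          have hcd : c ∣ m := floordiv_dvd_self p m hp hdvd
          have hcm : c * p = m := by
            rw [hc, PySem.Int.floordiv_eq_ediv_of_pos (by omega : (0:Int) < p)]
            exact Int.ediv_mul_cancel hdvd
          have hc2 : 2 ≤ c := by
            rcases lt_or_ge c 2 with h | h
            · interval_cases c <;> omega
            · exact h
          have hclt : c < p := by nlinarith
          exact hinv c hc2 hclt hcd
        have hstep : pvStepA (m, 1, res) p = (m, 1, res) := by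
          simp only [pvStepA]
          rw [pvDivLoop_eq_divW p hp m.natAbs m 1 hm (le_refl _),
            divW_not_dvd p m 1 hnd]
          rw [if_neg (by omega)]
        rw [hstep, ih (p + 1) m res (by omega) (by omega) hm hmn (by nlinarith)
          (fun q hq hql hd => by
            rcases eq_or_lt_of_le (by omega : q ≤ p) with h | h
            · exact hnd (h ▸ hd)
            · exact hinv q hq h hd)]

-- main bridge: A's fold from p equals B's outer loop from p followed by the final append
lemma mainAB (n : Int) : ∀ (fB : Nat) (p m : Int) (res : List Int),
    2 ≤ p → 1 ≤ m → m ≤ n → m.toNat + 1 - p.toNat ≤ fB →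
    (∀ q, 2 ≤ q → q < p → ¬ q ∣ m) →
    ((PySem.List.pyRange p n 1).foldl pvStepA (m, 1, res)).2.2 =
      (if 1 < (pvOuterB fB p m res).1 ∧ (pvOuterB fB p m res).1 < n then
        (pvOuterB fB p m res).2 ++ [(pvOuterB fB p m res).1] else (pvOuterB fB p m res).2) := by
  intro fB
  induction fB with
  | zero =>
    intro p m res hp hm hmn hf hinv
    have hmp : m < p := by omega
    simp only [pvOuterB]
    exact tailA n (n - p).toNat p m res (le_refl _) hp hm hmn (by nlinarith) hinv
  | succ fB ih =>
    intro p m res hp hm hmn hf hinv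
    by_cases hsq : p * p ≤ m
    · have hpm : p < m := by nlinarith
      have hpn : p < n := by omega
      rw [PySem.List.pyRange_one_cons hpn, List.foldl_cons]
      by_cases hdvd : p ∣ m
      · have hmod : PySem.Int.mod m p = 0 := (PySem.Int.mod_eq_zero_iff_dvd m p).mpr hdvd
        have h1 := one_le_floordiv p m hp hm hdvd
        have h2 := floordiv_lt_self p m hp hm
        have hloopB : pvDivLoop p m.natAbs (PySem.Int.floordiv m p, p) = divW p m 1 := by
          rw [pvDivLoop_eq_divW p hp m.natAbs (PySem.Int.floordiv m p) p h1 (by omega)]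
          rw [divW_step p m 1 hp hm hdvd, one_mul]
        have hD := divW_main p hp m.natAbs m 1 (le_refl _) hm
        have hDd := divW_d_large p m hp hm hdvd
        have hstep : pvStepA (m, 1, res) p = ((divW p m 1).1, 1, res ++ [(divW p m 1).2]) := by
          simp only [pvStepA]
          rw [pvDivLoop_eq_divW p hp m.natAbs m 1 hm (le_refl _)]
          rw [if_pos (by omega)]
        have hle : (divW p m 1).1 ≤ m := Int.le_of_dvd (by omega) hD.2.1
        rw [hstep]
        simp only [pvOuterB, if_pos hsq, hmod, if_pos, hloopB]
        exact ih (p + 1) (divW p m 1).1 (res ++ [(divW p m 1).2]) (by omega) hD.1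
          (by omega) (by omega) (fun q hq hql hd => by
            rcases eq_or_lt_of_le (by omega : q ≤ p) with h | h
            · exact hD.2.2.1 (h ▸ hd)
            · exact hinv q hq h (hd.trans hD.2.1))
      · have hmod : PySem.Int.mod m p ≠ 0 := fun hc =>
          hdvd ((PySem.Int.mod_eq_zero_iff_dvd m p).mp hc)
        have hstep : pvStepA (m, 1, res) p = (m, 1, res) := by
          simp only [pvStepA]
          rw [pvDivLoop_eq_divW p hp m.natAbs m 1 hm (le_refl _),
            divW_not_dvd p m 1 hdvd]
          rw [if_neg (by omega)]
        rw [hstep]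
        simp only [pvOuterB, if_pos hsq, hmod, if_false]
        exact ih (p + 1) m res (by omega) hm hmn (by omega) (fun q hq hql hd => by
          rcases eq_or_lt_of_le (by omega : q ≤ p) with h | h
          · exact hdvd (h ▸ hd)
          · exact hinv q hq h hd)
    · simp only [pvOuterB, if_neg hsq]
      exact tailA n (n - p).toNat p m res (le_refl _) hp hm hmn (by omega) hinv

-- ===== VERDICT (by name: the statement is the Claim_ definition above) =====
theorem strict_divisors_spec : Claim_equal_strict_divisors := by
  intro n _
  show strict_divisors n = strict_divisors_alt n
  by_cases h1 : 1 ≤ n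
  · have := mainAB n (n.natAbs + 1) 2 n [] (le_refl _) h1 (le_refl n) (by omega)
      (fun q hq hql _ => by omega)
    simpa [strict_divisors, strict_divisors_alt] using this
  · have hA : strict_divisors n = [] := by
      simp [strict_divisors, PySem.List.pyRange_one_eq_nil (show n ≤ 2 by omega)]
    have hB : strict_divisors_alt n = [] := by
      simp only [strict_divisors_alt, pvOuterB]
      rw [if_neg (by omega : ¬ ((2:Int) * 2 ≤ n))]
      simp only
      rw [if_neg (by omega)]
    rw [hA, hB]
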